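-- pv_equiv track=rewrite | github.com/almala333/EEBE-problemas-Jutge-Q1-24-25 | 03_Iteraciones/X55221_Counting a's (3).py | count_a
-- ===== SOURCE A (Python) =====
-- def count_a(s, stop):
--     '''
--     Paràmetres
--     ----------
--     s: str
--         Cadena de caràcters on es comptarà les 'a'.
--     stop: str
--         Caràcter que fa que la funció pari de comptar.
--
--     Retorna
--     -------
--     int
--         El nombre d'aparicions de la lletra 'a' fins que es troba el caràcter para_aturar. Si no es troba, retorna -1.
--
--     Tests públics
--     -------------
--     >>> compte_a('naturally', 'u')
--     1
--     >>> compte_a('russian', 't')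
--     -1
--     >>> compte_a('adaptation', 'a')
--     0
--     >>> compte_a('adaptation', 'n')
--     3
--
--     Tests privats
--     -------------
--     >>> compte_a('algoritme', 'e')
--     2
--     >>> compte_a('informàtica', 'i')
--     2
--     >>> compte_a('matemàtiques', 'm')
--     2
--
--     '''
--     compte = 0
--     for i in s:
--         if i == stop:
--              return compte
--         elif i ==  'a':
--             compte += 1
--     return -1
-- ===== SOURCE B (Python) =====
-- def count_a(s, stop):
--     idx = next((i for i, c in enumerate(s) if c == stop), None)
--     if idx is None:
--         return -1
--     return s[:idx].count('a')
-- ===== Notes on version B (the rewrite author's own statement) =====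
-- stated objective: simpler
-- what changed: Replaces the fused count-while-scanning loop with a find-first-stop-index pass followed by counting 'a' in the prefix slice before that index.
import Mathlib
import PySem

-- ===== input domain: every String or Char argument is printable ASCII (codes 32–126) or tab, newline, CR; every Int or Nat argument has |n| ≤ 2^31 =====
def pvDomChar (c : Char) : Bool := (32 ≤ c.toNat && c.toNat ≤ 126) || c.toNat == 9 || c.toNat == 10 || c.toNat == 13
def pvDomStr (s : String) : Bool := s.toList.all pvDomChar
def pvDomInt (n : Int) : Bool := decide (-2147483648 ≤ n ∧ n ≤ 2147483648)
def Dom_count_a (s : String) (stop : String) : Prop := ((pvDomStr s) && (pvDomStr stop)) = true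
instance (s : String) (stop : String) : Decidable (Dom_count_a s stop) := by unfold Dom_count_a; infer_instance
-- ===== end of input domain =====

-- B finds the first stop-character index, then counts 'a' in the prefix slice, instead of A's fused count-while-scanning loop (objective: simpler).


-- ===== PORT A =====
-- Python's `i == stop` compares a one-char string with stop: exact as list equality [c] = stop.toList
def pvChEq (c : Char) (stop : String) : Bool := [c] == stop.toList

def count_a_loop (stop : String) : List Char → Int → Int
  | [], _ => -1
  | c :: cs, compte =>
    if pvChEq c stop then compte
    else if c == 'a' then count_a_loop stop cs (compte + 1)
    else count_a_loop stop cs compte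

def count_a (s : String) (stop : String) : Int :=
  count_a_loop stop s.toList 0

-- ===== PORT B =====
def count_a_alt (s : String) (stop : String) : Int :=
  match s.toList.findIdx? (fun c => pvChEq c stop) with
  | none => -1
  | some i => ((s.toList.take i).count 'a' : Int)

-- ===== PRECONDITION & SPEC =====
def Spec_count_a (s : String) (stop : String) (out : Int) : Prop := out = count_a_alt s stop
instance (s : String) (stop : String) (out : Int) : Decidable (Spec_count_a s stop out) := by unfold Spec_count_a; infer_instance

-- ===== CLAIM (what is proved, stated in full; the proofs are below) =====
def Claim_equal_count_a : Prop := ∀ (s : String) (stop : String), Dom_count_a s stop → Spec_count_a s stop (count_a s stop)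

-- ===== LEMMAS AND PROOFS =====
theorem count_a_loop_eq (stop : String) (l : List Char) (acc : Int) :
    count_a_loop stop l acc =
      match l.findIdx? (fun c => pvChEq c stop) with
      | none => -1
      | some i => acc + ((l.take i).count 'a' : Int) := by
  induction l generalizing acc with
  | nil => simp [count_a_loop]
  | cons c cs ih =>
    by_cases h : pvChEq c stop = true
    · simp [count_a_loop, h, List.findIdx?_cons]
    · simp only [count_a_loop, h, Bool.false_eq_true, if_false]
      cases hf : cs.findIdx? (fun c => pvChEq c stop) with
      | none =>
        by_cases ha : c = 'a'
        · subst ha; simp [ih, hf, List.findIdx?_cons, h]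
        · simp [ha, ih, hf, List.findIdx?_cons, h]
      | some i =>
        by_cases ha : c = 'a'
        · subst ha; simp [ih, hf, List.findIdx?_cons, h, List.count_cons]; ring
        · simp [ha, ih, hf, List.findIdx?_cons, h, List.count_cons]

-- ===== VERDICT (by name: the statement is the Claim_ definition above) =====
theorem count_a_spec : Claim_equal_count_a := by
  intro s stop _
  unfold Spec_count_a count_a count_a_alt
  rw [count_a_loop_eq]
  cases s.toList.findIdx? (fun c => pvChEq c stop) <;> simp
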